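-- pv_equiv track=rewrite | github.com/i960107/algorithm | programmers/해시_신고결과받기.py | solution_practice
-- ===== SOURCE A (Python) =====
-- from collections import defaultdict
-- from typing import List
--
-- def solution_practice(id_list: List[str], report: List[str], k: int) -> List[int]:
--     answer = [0] * len(id_list)
--     d_users = {user: idx for idx, user in enumerate(id_list)}
--     d_reported = defaultdict(set)
--
--     for r in report:
--         reporter, reported = r.split()
--         reporter, reported = d_users[reporter], d_users[reported]
--         d_reported[reported].add(reporter)
--
--     # d_reported.items() -> O(N)
--     # 사람 자체가 아니라 count만 하면 공간 복잡도 낮음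
--     for reported, reporters in d_reported.items():
--         if len(reporters) >= k:
--             for user in reporters:
--                 answer[user] += 1
--     return answer
-- ===== SOURCE B (Python) =====
-- from typing import List
--
--
-- def solution_practice(id_list: List[str], report: List[str], k: int) -> List[int]:
--     # Sort-and-sweep: resolve reports to (reported, reporter) index pairs, sort by
--     # reported user, then sweep each contiguous run of one reported user,
--     # deduplicating its reporters by an ordered membership scan; no per-user
--     # dict/set grouping table is ever built.
--     idx = {u: t for t, u in enumerate(id_list)}
--     pairs = []
--     for r in report:
--         a, b = r.split()
--         pairs.append((idx[b], idx[a]))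
--     pairs.sort(key=lambda p: p[0])
--     answer = [0] * len(id_list)
--     i = 0
--     while i < len(pairs):
--         j = pairs[i][0]
--         t = i
--         reporters = []
--         while t < len(pairs) and pairs[t][0] == j:
--             a = pairs[t][1]
--             if a not in reporters:
--                 reporters.append(a)
--             t += 1
--         if len(reporters) >= k:
--             for a in reporters:
--                 answer[a] += 1
--         i = t
--     return answer
-- ===== Notes on version B (the rewrite author's own statement) =====
-- stated objective: alternative
-- what changed: A groups reporters into a hash dict of per-reported sets and walks its items with a nested loop; B never builds a grouping table: it sorts the resolved (reported, reporter) index pairs by reported user and sweeps the sorted list run by run, deduplicating each run's reporters with an ordered membership scan before crediting them.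
import Mathlib
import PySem

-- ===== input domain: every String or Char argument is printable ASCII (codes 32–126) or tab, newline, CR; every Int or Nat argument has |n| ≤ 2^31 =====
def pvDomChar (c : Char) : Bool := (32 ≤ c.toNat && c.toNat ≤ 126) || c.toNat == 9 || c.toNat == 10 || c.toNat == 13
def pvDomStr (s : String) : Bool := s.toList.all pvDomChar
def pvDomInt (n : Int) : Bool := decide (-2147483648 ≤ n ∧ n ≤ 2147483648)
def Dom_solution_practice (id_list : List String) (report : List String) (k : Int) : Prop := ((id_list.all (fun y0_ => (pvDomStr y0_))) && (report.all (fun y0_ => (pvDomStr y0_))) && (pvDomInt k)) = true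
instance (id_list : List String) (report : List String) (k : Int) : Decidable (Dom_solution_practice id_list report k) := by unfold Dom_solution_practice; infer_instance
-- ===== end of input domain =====

-- B sorts the resolved (reported, reporter) index pairs and sweeps runs of one reported user,
-- deduplicating reporters by an ordered membership scan, instead of A's dict of reporter sets ('alternative').

-- ===== PORT A =====
def solution_practice (id_list : List String) (report : List String) (k : Int) : List Int :=
  let answer := List.replicate id_list.length (0 : Int)
  let d_users := (PySem.List.enumerate id_list).foldl
      (fun d p => d.insert p.2 p.1) (PySem.Dict.empty : PySem.Dict String Int)
  let d_reported := report.foldl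
      (fun (d : PySem.Dict Int (PySem.Set Int)) r =>
        match PySem.Str.split₀ r with
        | [reporter, reported] =>
          match d_users.get? reporter, d_users.get? reported with
          | some ri, some di => d.modify di [] (fun s => PySem.Set.add s ri)
          | _, _ => d      -- KeyError in Python: excluded by Pre_
        | _ => d)          -- tuple-unpacking ValueError in Python: excluded by Pre_
      PySem.Dict.empty
  d_reported.items.foldl
    (fun ans q =>
      if k ≤ PySem.Set.len q.2 then
        q.2.foldl (fun ans u => PySem.List.pySetD ans u (PySem.List.pyGetD ans u 0 + 1)) ans
      else ans)
    answer

-- ===== PORT B =====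
-- the two nested while loops of Source B: sweep one run of equal reported index, then recurse on the rest
def scanRuns (k : Int) : List (Int × Int) → List Int → List Int
  | [], ans => ans
  | p :: rest, ans =>
    let run := (p :: rest).takeWhile (fun q => q.1 == p.1)
    let reporters := run.foldl
        (fun (rep : List Int) q => if rep.contains q.2 then rep else rep ++ [q.2]) []
    scanRuns k ((p :: rest).dropWhile (fun q => q.1 == p.1))
      (if k ≤ (reporters.length : Int) then
        reporters.foldl (fun a u => PySem.List.pySetD a u (PySem.List.pyGetD a u 0 + 1)) ans
       else ans)
termination_by M _ => M.length
decreasing_by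
  simp only [List.dropWhile_cons, beq_self_eq_true, if_true, List.length_cons]
  exact Nat.lt_succ_of_le (List.length_dropWhile_le _ _)

def solution_practice_alt (id_list : List String) (report : List String) (k : Int) : List Int :=
  let idx := (PySem.List.enumerate id_list).foldl
      (fun d p => d.insert p.2 p.1) (PySem.Dict.empty : PySem.Dict String Int)
  let pairs := report.foldl
      (fun (ps : List (Int × Int)) r =>
        let toks := PySem.Str.split₀ r
        if toks.length = 2 then      -- tuple-unpacking ValueError otherwise: excluded by Pre_
          ((idx.get? (toks.getD 0 "")).bind (fun ia =>
            (idx.get? (toks.getD 1 "")).map (fun ib =>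
              ps ++ [(ib, ia)]))).getD ps   -- KeyError (= none): excluded by Pre_
        else ps)
      []
  let pairsSorted := PySem.List.sorted pairs (fun p => p.1) false
  let answer := List.replicate id_list.length (0 : Int)
  scanRuns k pairsSorted answer

-- ===== PRECONDITION & SPEC =====
-- Pre_ excludes exactly the reports on which the Python A raises: a report that does not split
-- into exactly two whitespace-separated tokens (ValueError) or mentions an id absent from
-- id_list (KeyError). B raises the same exceptions there.
def Pre_solution_practice (id_list : List String) (report : List String) (k : Int) : Prop :=
  ∀ r ∈ report, (PySem.Str.split₀ r).length = 2 ∧ ∀ t ∈ PySem.Str.split₀ r, t ∈ id_list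
instance (id_list : List String) (report : List String) (k : Int) : Decidable (Pre_solution_practice id_list report k) := by unfold Pre_solution_practice; infer_instance

def pvWitness_solution_practice : List String × List String × Int := (["muzi", "frodo"], ["muzi frodo", "frodo muzi", "muzi frodo"], 1)

def Spec_solution_practice (id_list : List String) (report : List String) (k : Int) (out : List Int) : Prop := out = solution_practice_alt id_list report k
instance (id_list : List String) (report : List String) (k : Int) (out : List Int) : Decidable (Spec_solution_practice id_list report k out) := by unfold Spec_solution_practice; infer_instance

-- ===== CLAIM (what is proved, stated in full; the proofs are below) =====
def Claim_equal_solution_practice : Prop := ∀ (id_list : List String) (report : List String) (k : Int), Dom_solution_practice id_list report k → Pre_solution_practice id_list report k → Spec_solution_practice id_list report k (solution_practice id_list report k)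

-- ===== LEMMAS AND PROOFS =====

-- resolve one report line through the id→index dict
def resv (du : PySem.Dict String Int) (r : String) : Option (Int × Int) :=
  match PySem.Str.split₀ r with
  | [a, b] =>
    match du.get? a, du.get? b with
    | some ia, some ib => some (ia, ib)
    | _, _ => none
  | _ => none

lemma foldA (du : PySem.Dict String Int) :
    ∀ (rs : List String) (d : PySem.Dict Int (PySem.Set Int)),
    rs.foldl (fun d r =>
        match PySem.Str.split₀ r with
        | [reporter, reported] =>
          match du.get? reporter, du.get? reported with
          | some ri, some di => d.modify di [] (fun s => PySem.Set.add s ri)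
          | _, _ => d
        | _ => d) d
    = (rs.filterMap (resv du)).foldl
        (fun d p => d.modify p.2 [] (fun s => PySem.Set.add s p.1)) d := by
  intro rs
  induction rs with
  | nil => intro d; rfl
  | cons r rs ih =>
    intro d
    simp only [List.foldl_cons, List.filterMap_cons]
    rcases hs : PySem.Str.split₀ r with _ | ⟨a, _ | ⟨b, _ | ⟨c, t⟩⟩⟩ <;>
      simp only [resv, hs] <;> try exact ih d
    rcases ha : du.get? a with _ | ia <;> rcases hb : du.get? b with _ | ib <;>
      first | exact ih d | exact ih _

lemma foldB (du : PySem.Dict String Int) :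
    ∀ (rs : List String) (ps : List (Int × Int)),
    rs.foldl (fun (ps : List (Int × Int)) r =>
        let toks := PySem.Str.split₀ r
        if toks.length = 2 then
          ((du.get? (toks.getD 0 "")).bind (fun ia =>
            (du.get? (toks.getD 1 "")).map (fun ib =>
              ps ++ [(ib, ia)]))).getD ps
        else ps) ps
    = ps ++ (rs.filterMap (resv du)).map (fun p => (p.2, p.1)) := by
  intro rs
  induction rs with
  | nil => intro ps; simp
  | cons r rs ih =>
    intro ps
    simp only [List.foldl_cons, List.filterMap_cons]
    rcases hs : PySem.Str.split₀ r with _ | ⟨a, _ | ⟨b, _ | ⟨c, t⟩⟩⟩ <;>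
      simp only [resv, hs]
    · norm_num
      exact ih ps
    · norm_num
      exact ih ps
    · simp only [List.getD_cons_zero, List.getD_cons_succ]
      rw [if_pos (by simp : ((a :: b :: List.nil : List String).length = 2))]
      rcases ha : du.get? a with _ | ia <;> rcases hb : du.get? b with _ | ib <;>
        simp only [ha, hb, Option.bind_none, Option.bind_some, Option.map_none, Option.map_some,
          Option.getD_none, Option.getD_some] <;>
        first
          | exact ih ps
          | (rw [ih (ps ++ [(ib, ia)])]; simp [resv])
    · simp only [List.length_cons]
      norm_num
      exact ih ps

lemma get?_mem_values (d : PySem.Dict String Int) (a : String) (v : Int)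
    (h : d.get? a = some v) : v ∈ d.values := by
  have hm := PySem.Dict.mem_items_of_get?_eq_some d h
  simp only [PySem.Dict.values, List.mem_map]
  exact ⟨(a, v), hm, rfl⟩

lemma values_users_fold {Q : Int → Prop} :
    ∀ (l : List (Int × String)) (d : PySem.Dict String Int),
    (∀ w ∈ d.values, Q w) → (∀ p ∈ l, Q p.1) →
    ∀ w ∈ (l.foldl (fun d p => d.insert p.2 p.1) d).values, Q w := by
  intro l
  induction l with
  | nil => intro d hd _ w hw; exact hd w hw
  | cons p l ih =>
    intro d hd hl w hw
    refine ih (d.insert p.2 p.1) ?_ (fun q hq => hl q (List.mem_cons_of_mem _ hq)) w hw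
    intro w' hw'
    rcases PySem.Dict.mem_values_insert d p.2 p.1 w' hw' with h | h
    · exact h ▸ hl p (List.mem_cons_self ..)
    · exact hd w' h

lemma resv_fst_mem_values (du : PySem.Dict String Int) (r : String) (p : Int × Int)
    (h : resv du r = some p) : p.1 ∈ du.values := by
  unfold resv at h
  rcases hs : PySem.Str.split₀ r with _ | ⟨a, _ | ⟨b, _ | ⟨c, t⟩⟩⟩ <;> rw [hs] at h <;>
    [skip; skip; skip; skip] <;> try simp at h
  rcases ha : du.get? a with _ | ia <;> rcases hb : du.get? b with _ | ib <;>
    rw [ha, hb] at h <;> simp at h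
  subst h
  exact get?_mem_values du a ia ha

lemma incr_fold (us : List Int) :
    ∀ (ans : List Int), (∀ u ∈ us, ∃ kk : Nat, kk < ans.length ∧ u = (kk : Int)) →
    (us.foldl (fun ans u => PySem.List.pySetD ans u (PySem.List.pyGetD ans u 0 + 1)) ans).length = ans.length ∧
    ∀ m : Nat, PySem.List.pyGetD (us.foldl (fun ans u => PySem.List.pySetD ans u (PySem.List.pyGetD ans u 0 + 1)) ans) (m : Int) 0
      = PySem.List.pyGetD ans (m : Int) 0 + (us.count (m : Int) : Int) := by
  induction us with
  | nil => intro ans _; simp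
  | cons u us ih =>
    intro ans h
    obtain ⟨kk, hkk, hu⟩ := h u (List.mem_cons_self ..)
    have hlen : (PySem.List.pySetD ans u (PySem.List.pyGetD ans u 0 + 1)).length = ans.length :=
      PySem.List.length_pySetD ..
    have htail : ∀ v ∈ us, ∃ kk : Nat, kk < (PySem.List.pySetD ans u (PySem.List.pyGetD ans u 0 + 1)).length ∧ v = (kk : Int) := by
      rw [hlen]; exact fun v hv => h v (List.mem_cons_of_mem _ hv)
    obtain ⟨ihlen, ihget⟩ := ih _ htail
    constructor
    · simp only [List.foldl_cons]; rw [ihlen, hlen]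
    · intro m
      simp only [List.foldl_cons]
      rw [ihget m, hu, PySem.List.pyGetD_pySetD_natCast _ _ _ _ _ hkk]
      rw [List.count_cons]
      by_cases hm : m = kk
      · subst hm; simp; ring
      · have : ¬ ((kk : Int) == (m : Int)) = true := by simpa using fun hh => hm (by exact_mod_cast hh.symm)
        simp [hm, this]

lemma getD_modifyfold :
    ∀ (L : List (Int × Int)) (d : PySem.Dict Int (PySem.Set Int)) (j : Int),
    (L.foldl (fun d p => d.modify p.2 [] (fun s => PySem.Set.add s p.1)) d).getD j []
      = PySem.Set.update (d.getD j []) ((L.filter (fun p => p.2 == j)).map Prod.fst) := by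
  intro L
  induction L with
  | nil => intro d j; rfl
  | cons p L ih =>
    intro d j
    simp only [List.foldl_cons, List.filter_cons]
    rw [ih]
    rw [PySem.Dict.getD_modify]
    by_cases hj : p.2 = j
    · have hb : (p.2 == j) = true := by simpa using hj
      simp only [hb, if_pos hj.symm, if_true, List.map_cons]
      subst hj
      rfl
    · have hb : (p.2 == j) = false := by simpa using hj
      have hj' : ¬ (j = p.2) := fun hh => hj hh.symm
      simp only [hb, if_neg hj', Bool.false_eq_true, if_false]

lemma A_outer (k : Int) :
    ∀ (its : List (Int × PySem.Set Int)) (ans : List Int),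
    (∀ q ∈ its, ∀ u ∈ q.2, ∃ kk : Nat, kk < ans.length ∧ u = (kk : Int)) →
    (∀ q ∈ its, List.Nodup q.2) →
    (its.foldl (fun ans q =>
        if k ≤ PySem.Set.len q.2 then
          q.2.foldl (fun ans u => PySem.List.pySetD ans u (PySem.List.pyGetD ans u 0 + 1)) ans
        else ans) ans).length = ans.length ∧
    ∀ m : Nat, PySem.List.pyGetD (its.foldl (fun ans q =>
        if k ≤ PySem.Set.len q.2 then
          q.2.foldl (fun ans u => PySem.List.pySetD ans u (PySem.List.pyGetD ans u 0 + 1)) ans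
        else ans) ans) (m : Int) 0
      = PySem.List.pyGetD ans (m : Int) 0
        + (its.countP (fun q => decide (k ≤ PySem.Set.len q.2) && q.2.contains ((m : Nat) : Int)) : Int) := by
  intro its
  induction its with
  | nil => intro ans _ _; simp
  | cons q its ih =>
    intro ans hr hnd
    have hq2 : ∀ u ∈ q.2, ∃ kk : Nat, kk < ans.length ∧ u = (kk : Int) :=
      hr q (List.mem_cons_self ..)
    by_cases hc : k ≤ PySem.Set.len q.2
    · obtain ⟨l1, g1⟩ := incr_fold q.2 ans hq2
      have hr' : ∀ p ∈ its, ∀ u ∈ p.2, ∃ kk : Nat,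
          kk < (q.2.foldl (fun ans u => PySem.List.pySetD ans u (PySem.List.pyGetD ans u 0 + 1)) ans).length ∧ u = (kk : Int) := by
        rw [l1]; exact fun p hp => hr p (List.mem_cons_of_mem _ hp)
      obtain ⟨l2, g2⟩ := ih _ hr' (fun p hp => hnd p (List.mem_cons_of_mem _ hp))
      constructor
      · simp only [List.foldl_cons, if_pos hc]
        rw [l2, l1]
      · intro m
        simp only [List.foldl_cons, if_pos hc, List.countP_cons]
        rw [g2 m, g1 m]
        have hcb : q.2.contains ((m : Nat) : Int) = true ↔ ((m : Nat) : Int) ∈ q.2 := by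
          simp [PySem.Set.contains]
        have hcnt : q.2.count ((m : Nat) : Int) = if q.2.contains ((m : Nat) : Int) then 1 else 0 := by
          by_cases hm : ((m : Nat) : Int) ∈ q.2
          · rw [List.count_eq_one_of_mem (hnd q (List.mem_cons_self ..)) hm, if_pos (hcb.mpr hm)]
          · rw [List.count_eq_zero_of_not_mem hm, if_neg (fun hh => hm (hcb.mp hh))]
        rw [hcnt]
        simp only [hc, decide_true, Bool.true_and]
        push_cast
        ring
    · simp only [List.foldl_cons, if_neg hc]
      obtain ⟨l2, g2⟩ := ih ans (fun p hp => hr p (List.mem_cons_of_mem _ hp)) (fun p hp => hnd p (List.mem_cons_of_mem _ hp))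
      refine ⟨l2, fun m => ?_⟩
      rw [g2 m]
      simp only [List.countP_cons]
      have : (decide (k ≤ PySem.Set.len q.2) && q.2.contains ((m : Nat) : Int)) = false := by
        simp only [PySem.Set.len] at hc
        simp [hc]
      rw [this]
      simp

lemma len_eq_of_nodup_mem {α : Type} (l1 l2 : List α) (h1 : l1.Nodup) (h2 : l2.Nodup)
    (h : ∀ a, a ∈ l1 ↔ a ∈ l2) : l1.length = l2.length :=
  ((List.perm_ext_iff_of_nodup h1 h2).mpr h).length_eq

lemma countP_nodup_mem {α : Type} (p : α → Bool) (l1 l2 : List α) (h1 : l1.Nodup) (h2 : l2.Nodup)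
    (h : ∀ a, a ∈ l1 ↔ a ∈ l2) : l1.countP p = l2.countP p := by
  rw [List.countP_eq_length_filter, List.countP_eq_length_filter]
  refine len_eq_of_nodup_mem _ _ (h1.filter p) (h2.filter p) ?_
  intro a
  simp only [List.mem_filter]
  exact and_congr_left (fun _ => h a)

lemma mem_filter_map_fst (P : List (Int × Int)) (j a : Int) :
    a ∈ (P.filter (fun p => p.2 == j)).map Prod.fst ↔ (a, j) ∈ P := by
  simp only [List.mem_map, List.mem_filter, beq_iff_eq]
  constructor
  · rintro ⟨⟨p1, p2⟩, ⟨hp, rfl⟩, rfl⟩; exact hp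
  · intro h; exact ⟨(a, j), ⟨h, rfl⟩, rfl⟩

lemma mem_filter_map_snd (M : List (Int × Int)) (j a : Int) :
    a ∈ (M.filter (fun q => q.1 == j)).map Prod.snd ↔ (j, a) ∈ M := by
  simp only [List.mem_map, List.mem_filter, beq_iff_eq]
  constructor
  · rintro ⟨⟨p1, p2⟩, ⟨hp, rfl⟩, rfl⟩; exact hp
  · intro h; exact ⟨(j, a), ⟨h, rfl⟩, rfl⟩

-- grouping in a list sorted by first component: the run at the head is a filter
lemma takedrop_fst (j : Int) :
    ∀ (M : List (Int × Int)), M.Pairwise (fun a b => a.1 ≤ b.1) → (∀ q ∈ M, j ≤ q.1) →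
    M.takeWhile (fun q => q.1 == j) = M.filter (fun q => q.1 == j) ∧
    M.dropWhile (fun q => q.1 == j) = M.filter (fun q => !(q.1 == j)) := by
  intro M
  induction M with
  | nil => intro _ _; exact ⟨rfl, rfl⟩
  | cons q M ih =>
    intro hpw hlb
    have hpw' := (List.pairwise_cons.mp hpw).2
    have hhead := (List.pairwise_cons.mp hpw).1
    by_cases hq : q.1 = j
    · have hb : (q.1 == j) = true := by simpa using hq
      have hlb' : ∀ r ∈ M, j ≤ r.1 := fun r hr => hlb r (List.mem_cons_of_mem _ hr)
      obtain ⟨iht, ihd⟩ := ih hpw' hlb'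
      constructor
      · simp only [List.takeWhile_cons, List.filter_cons, hb, if_true, iht]
      · simp only [List.dropWhile_cons, List.filter_cons, hb, Bool.not_true,
          Bool.false_eq_true, if_false, if_true, ihd]
    · have hb : (q.1 == j) = false := by simpa using hq
      have hlt : j < q.1 := lt_of_le_of_ne (hlb q (List.mem_cons_self ..)) (fun hh => hq hh.symm)
      have hnone : ∀ r ∈ M, (r.1 == j) = false := by
        intro r hr
        have := hhead r hr
        simp only [beq_eq_false_iff_ne, ne_eq]
        intro hh; rw [hh] at this; exact absurd this (not_le.mpr hlt)
      constructor
      · simp only [List.takeWhile_cons, List.filter_cons, hb, Bool.false_eq_true, if_false]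
        rw [List.filter_eq_nil_iff.mpr ?_]
        intro r hr; rw [hnone r hr]; simp
      · simp only [List.dropWhile_cons, List.filter_cons, hb, Bool.not_false,
          Bool.false_eq_true, if_false, if_true]
        rw [List.filter_eq_self.mpr ?_]
        intro r hr; rw [hnone r hr]; rfl

lemma filter_filter_ne (p : Int × Int) (rest : List (Int × Int)) (j : Int) (hj : j ≠ p.1) :
    ((p :: rest).filter (fun q => !(q.1 == p.1))).filter (fun q => q.1 == j)
      = (p :: rest).filter (fun q => q.1 == j) := by
  rw [List.filter_filter]
  refine List.filter_congr ?_
  intro q _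
  by_cases hq : q.1 = j
  · have h1 : (q.1 == j) = true := by simpa using hq
    have h2 : (q.1 == p.1) = false := by simp [hq, hj]
    simp [h1, h2]
  · have h1 : (q.1 == j) = false := by simpa using hq
    simp [h1]

lemma count_step (k m : Int) (p : Int × Int) (rest : List (Int × Int)) :
    List.countP (fun j =>
        decide (k ≤ PySem.Set.len (PySem.Set.ofList (((p :: rest).filter (fun q => q.1 == j)).map Prod.snd)))
          && (PySem.Set.ofList (((p :: rest).filter (fun q => q.1 == j)).map Prod.snd)).contains m)
      (PySem.Set.ofList ((p :: rest).map Prod.fst))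
    = (if decide (k ≤ PySem.Set.len (PySem.Set.ofList (((p :: rest).filter (fun q => q.1 == p.1)).map Prod.snd)))
          && (PySem.Set.ofList (((p :: rest).filter (fun q => q.1 == p.1)).map Prod.snd)).contains m
        then 1 else 0)
      + List.countP (fun j =>
          decide (k ≤ PySem.Set.len (PySem.Set.ofList ((((p :: rest).filter (fun q => !(q.1 == p.1))).filter (fun q => q.1 == j)).map Prod.snd)))
            && (PySem.Set.ofList ((((p :: rest).filter (fun q => !(q.1 == p.1))).filter (fun q => q.1 == j)).map Prod.snd)).contains m)
        (PySem.Set.ofList (((p :: rest).filter (fun q => !(q.1 == p.1))).map Prod.fst)) := by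
  rw [List.map_cons, PySem.Set.ofList_cons, List.countP_cons]
  rw [Nat.add_comm]
  congr 1
  have step1 : List.countP (fun j =>
        decide (k ≤ PySem.Set.len (PySem.Set.ofList (((p :: rest).filter (fun q => q.1 == j)).map Prod.snd)))
          && (PySem.Set.ofList (((p :: rest).filter (fun q => q.1 == j)).map Prod.snd)).contains m)
      (PySem.Set.discard (PySem.Set.ofList (rest.map Prod.fst)) p.1)
      = List.countP (fun j =>
          decide (k ≤ PySem.Set.len (PySem.Set.ofList ((((p :: rest).filter (fun q => !(q.1 == p.1))).filter (fun q => q.1 == j)).map Prod.snd)))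
            && (PySem.Set.ofList ((((p :: rest).filter (fun q => !(q.1 == p.1))).filter (fun q => q.1 == j)).map Prod.snd)).contains m)
        (PySem.Set.discard (PySem.Set.ofList (rest.map Prod.fst)) p.1) := by
    refine List.countP_congr ?_
    intro j hj
    have hjne : j ≠ p.1 := ((PySem.Set.mem_discard _ _ _).mp hj).2
    rw [filter_filter_ne p rest j hjne]
  rw [step1]
  refine countP_nodup_mem _ _ _
    (PySem.Set.nodup_discard _ _ (PySem.Set.nodup_ofList _))
    (PySem.Set.nodup_ofList _) ?_
  intro a
  rw [PySem.Set.mem_discard, PySem.Set.mem_ofList, PySem.Set.mem_ofList]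
  simp only [List.mem_map, List.mem_filter, List.mem_cons, Bool.not_eq_eq_eq_not,
    Bool.not_true, beq_eq_false_iff_ne, ne_eq]
  constructor
  · rintro ⟨⟨q, hq, rfl⟩, hne⟩
    exact ⟨q, ⟨Or.inr hq, hne⟩, rfl⟩
  · rintro ⟨q, ⟨hq, hne⟩, rfl⟩
    rcases hq with h | h
    · exact absurd (congrArg Prod.fst h) (by simpa using hne)
    · exact ⟨⟨q, h, rfl⟩, hne⟩

-- the sweep characterised: one increment per distinct reported index whose (deduplicated) run qualifies
lemma B_outer (k : Int) :
    ∀ (N : Nat) (M : List (Int × Int)), M.length ≤ N →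
    M.Pairwise (fun a b => a.1 ≤ b.1) →
    ∀ (ans : List Int), (∀ p ∈ M, ∃ kk : Nat, kk < ans.length ∧ p.2 = (kk : Int)) →
    (scanRuns k M ans).length = ans.length ∧
    ∀ m : Nat, PySem.List.pyGetD (scanRuns k M ans) (m : Int) 0
      = PySem.List.pyGetD ans (m : Int) 0
        + ((PySem.Set.ofList (M.map Prod.fst)).countP (fun j =>
            decide (k ≤ PySem.Set.len (PySem.Set.ofList ((M.filter (fun q => q.1 == j)).map Prod.snd)))
              && (PySem.Set.ofList ((M.filter (fun q => q.1 == j)).map Prod.snd)).contains ((m : Nat) : Int)) : Int) := by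
  intro N
  induction N with
  | zero =>
    intro M hlen _ ans _
    have hM : M = [] := List.eq_nil_of_length_eq_zero (Nat.le_zero.mp hlen)
    subst hM
    simp [scanRuns]
  | succ N ihN =>
    intro M hlen hpw ans hr
    match M, hlen with
    | [], _ => simp [scanRuns]
    | p :: rest, hlen =>
      have hlb : ∀ q ∈ p :: rest, p.1 ≤ q.1 := by
        intro q hq
        rcases List.mem_cons.mp hq with h | h
        · rw [h]
        · exact (List.pairwise_cons.mp hpw).1 q h
      obtain ⟨htake, hdrop⟩ := takedrop_fst p.1 (p :: rest) hpw hlb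
      have hded : ∀ (l : List (Int × Int)),
          l.foldl (fun (rep : List Int) q => if rep.contains q.2 then rep else rep ++ [q.2]) []
            = PySem.Set.ofList (l.map Prod.snd) := by
        intro l
        rw [← PySem.Set.update_nil_left, PySem.Set.update_map_eq_foldl_add]
        rfl
      rw [scanRuns]
      rw [hded, htake, hdrop]
      have hRSrange : ∀ u ∈ PySem.Set.ofList (((p :: rest).filter (fun q => q.1 == p.1)).map Prod.snd),
          ∃ kk : Nat, kk < ans.length ∧ u = (kk : Int) := by
        intro u hu
        rw [PySem.Set.mem_ofList] at hu
        obtain ⟨q, hq, rfl⟩ := List.mem_map.mp hu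
        exact hr q (List.mem_filter.mp hq).1
      have hlenM' : ((p :: rest).filter (fun q => !(q.1 == p.1))).length ≤ N := by
        have h1 : ((p :: rest).filter (fun q => !(q.1 == p.1))) = rest.filter (fun q => !(q.1 == p.1)) := by
          simp
        rw [h1]
        exact le_trans (List.length_filter_le _ _) (Nat.succ_le_succ_iff.mp (by simpa using hlen))
      have hpwM' : ((p :: rest).filter (fun q => !(q.1 == p.1))).Pairwise (fun a b => a.1 ≤ b.1) :=
        hpw.sublist List.filter_sublist
      have hnd : (PySem.Set.ofList (((p :: rest).filter (fun q => q.1 == p.1)).map Prod.snd)).Nodup :=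
        PySem.Set.nodup_ofList _
      by_cases hcnd : k ≤ ((PySem.Set.ofList (((p :: rest).filter (fun q => q.1 == p.1)).map Prod.snd)).length : Int)
      · rw [if_pos hcnd]
        obtain ⟨l1, g1⟩ := incr_fold _ ans hRSrange
        have hr' : ∀ q ∈ (p :: rest).filter (fun q => !(q.1 == p.1)),
            ∃ kk : Nat, kk < ((PySem.Set.ofList (((p :: rest).filter (fun q => q.1 == p.1)).map Prod.snd)).foldl
              (fun a u => PySem.List.pySetD a u (PySem.List.pyGetD a u 0 + 1)) ans).length ∧ q.2 = (kk : Int) := by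
          rw [l1]; intro q hq; exact hr q (List.mem_filter.mp hq).1
        obtain ⟨l2, g2⟩ := ihN _ hlenM' hpwM' _ hr'
        refine ⟨by rw [l2, l1], ?_⟩
        intro m
        rw [g2 m, g1 m, count_step k ((m : Nat) : Int) p rest]
        have hdec : decide (k ≤ PySem.Set.len (PySem.Set.ofList (((p :: rest).filter (fun q => q.1 == p.1)).map Prod.snd))) = true := by
          simpa [PySem.Set.len] using hcnd
        have hcb : (PySem.Set.ofList (((p :: rest).filter (fun q => q.1 == p.1)).map Prod.snd)).contains ((m : Nat) : Int) = true
            ↔ ((m : Nat) : Int) ∈ PySem.Set.ofList (((p :: rest).filter (fun q => q.1 == p.1)).map Prod.snd) := by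
          simp [PySem.Set.contains]
        have hcnt : (PySem.Set.ofList (((p :: rest).filter (fun q => q.1 == p.1)).map Prod.snd)).count ((m : Nat) : Int)
            = if (PySem.Set.ofList (((p :: rest).filter (fun q => q.1 == p.1)).map Prod.snd)).contains ((m : Nat) : Int) then 1 else 0 := by
          by_cases hm : ((m : Nat) : Int) ∈ PySem.Set.ofList (((p :: rest).filter (fun q => q.1 == p.1)).map Prod.snd)
          · rw [List.count_eq_one_of_mem hnd hm, if_pos (hcb.mpr hm)]
          · rw [List.count_eq_zero_of_not_mem hm, if_neg (fun hh => hm (hcb.mp hh))]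
        rw [hcnt, hdec]
        simp only [Bool.true_and]
        by_cases hm : (PySem.Set.ofList (((p :: rest).filter (fun q => q.1 == p.1)).map Prod.snd)).contains ((m : Nat) : Int)
        · rw [if_pos hm]; push_cast; ring
        · rw [if_neg hm]; push_cast; ring
      · rw [if_neg hcnd]
        obtain ⟨l2, g2⟩ := ihN _ hlenM' hpwM' ans
          (fun q hq => hr q (List.mem_filter.mp hq).1)
        refine ⟨l2, ?_⟩
        intro m
        rw [g2 m, count_step k ((m : Nat) : Int) p rest]
        have hdec : decide (k ≤ PySem.Set.len (PySem.Set.ofList (((p :: rest).filter (fun q => q.1 == p.1)).map Prod.snd))) = false := by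
          simpa [PySem.Set.len] using hcnd
        rw [hdec]
        simp only [Bool.false_and, Bool.false_eq_true, if_false]
        push_cast
        ring

-- the shared core: A's grouped nested loop and B's sorted sweep agree on the resolved pair list
lemma core (k : Int) (n : Nat) (L : List (Int × Int))
    (hrange : ∀ p ∈ L, ∃ kk : Nat, kk < n ∧ p.1 = (kk : Int)) :
    ((L.foldl (fun d p => d.modify p.2 [] (fun s => PySem.Set.add s p.1))
        (PySem.Dict.empty : PySem.Dict Int (PySem.Set Int))).items.foldl
      (fun ans q =>
        if k ≤ PySem.Set.len q.2 then
          q.2.foldl (fun ans u => PySem.List.pySetD ans u (PySem.List.pyGetD ans u 0 + 1)) ans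
        else ans)
      (List.replicate n (0 : Int)))
    = scanRuns k (PySem.List.sorted (L.map (fun p => (p.2, p.1))) (fun p => p.1) false)
        (List.replicate n (0 : Int)) := by
  set SJ : Int → PySem.Set Int :=
    fun j => PySem.Set.ofList ((L.filter (fun p => p.2 == j)).map Prod.fst) with hSJ
  set d := L.foldl (fun d p => d.modify p.2 [] (fun s => PySem.Set.add s p.1))
      (PySem.Dict.empty : PySem.Dict Int (PySem.Set Int)) with hd
  set M := PySem.List.sorted (L.map (fun p => (p.2, p.1))) (fun p => p.1) false with hM
  -- membership bridge between B's sorted swapped pairs and L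
  have hmemM : ∀ (j a : Int), (j, a) ∈ M ↔ (a, j) ∈ L := by
    intro j a
    rw [hM, PySem.List.mem_sorted]
    constructor
    · intro h
      obtain ⟨p, hp, he⟩ := List.mem_map.mp h
      have h1 : p.2 = j := congrArg Prod.fst he
      have h2 : p.1 = a := congrArg Prod.snd he
      have : p = (a, j) := Prod.ext h2 h1
      rwa [this] at hp
    · intro h
      exact List.mem_map.mpr ⟨(a, j), h, rfl⟩
  have hsetMem : ∀ (j x : Int),
      x ∈ PySem.Set.ofList ((M.filter (fun q => q.1 == j)).map Prod.snd) ↔ x ∈ SJ j := by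
    intro j x
    rw [PySem.Set.mem_ofList, mem_filter_map_snd, hSJ, PySem.Set.mem_ofList, mem_filter_map_fst]
    exact hmemM j x
  have hsetLen : ∀ j : Int,
      PySem.Set.len (PySem.Set.ofList ((M.filter (fun q => q.1 == j)).map Prod.snd))
        = PySem.Set.len (SJ j) := by
    intro j
    have h := len_eq_of_nodup_mem _ _ (PySem.Set.nodup_ofList _) (PySem.Set.nodup_ofList _) (hsetMem j)
    simp only [PySem.Set.len, hSJ]
    exact_mod_cast h
  have hsetCont : ∀ (j x : Int),
      (PySem.Set.ofList ((M.filter (fun q => q.1 == j)).map Prod.snd)).contains x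
        = (SJ j).contains x := by
    intro j x
    by_cases hx : x ∈ SJ j
    · rw [(PySem.Set.contains_iff _ _).mpr hx, (PySem.Set.contains_iff _ _).mpr ((hsetMem j x).mpr hx)]
    · have h1 : ¬ x ∈ PySem.Set.ofList ((M.filter (fun q => q.1 == j)).map Prod.snd) :=
        fun hh => hx ((hsetMem j x).mp hh)
      have e1 : (PySem.Set.ofList ((M.filter (fun q => q.1 == j)).map Prod.snd)).contains x = false :=
        Bool.eq_false_iff.mpr (fun hh => h1 ((PySem.Set.contains_iff _ _).mp hh))
      have e2 : (SJ j).contains x = false :=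
        Bool.eq_false_iff.mpr (fun hh => hx ((PySem.Set.contains_iff _ _).mp hh))
      rw [e1, e2]
  -- facts about A's dict
  have hkeys : d.keys = PySem.Set.ofList (L.map Prod.snd) := by
    rw [hd, PySem.Dict.keys_foldl_modify_key L (fun p => p.2) [] (fun _ p => (fun s => PySem.Set.add s p.1))]
    rfl
  have hnodupk : d.keys.Nodup := by
    rw [hd]
    exact PySem.Dict.nodup_keys_foldl_modify_key L (fun p => p.2) [] (fun _ p => (fun s => PySem.Set.add s p.1)) _ (by simp [PySem.Dict.empty, PySem.Dict.keys])
  have hgetD : ∀ j, d.getD j [] = SJ j := by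
    intro j
    rw [hd, getD_modifyfold]
    rfl
  have hq2 : ∀ q ∈ d.items, q.2 = SJ q.1 := by
    intro q hq
    have hg : d.get? q.1 = some q.2 :=
      PySem.Dict.get?_of_mem_items d (by simpa using hq) hnodupk
    have : d.getD q.1 [] = q.2 := by rw [PySem.Dict.getD, hg]; rfl
    rw [← this, hgetD]
  have hSJr : ∀ j, ∀ u ∈ SJ j, ∃ kk : Nat, kk < n ∧ u = (kk : Int) := by
    intro j u hu
    rw [hSJ, PySem.Set.mem_ofList, mem_filter_map_fst] at hu
    exact hrange (u, j) hu
  -- A side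
  obtain ⟨lenA, gA⟩ := A_outer k d.items (List.replicate n (0 : Int))
    (by
      intro q hq u hu
      rw [hq2 q hq] at hu
      simpa using hSJr q.1 u hu)
    (by
      intro q hq
      rw [hq2 q hq]
      exact PySem.Set.nodup_ofList _)
  -- B side
  have hpwM : M.Pairwise (fun a b : Int × Int => a.1 ≤ b.1) := by
    rw [hM]; exact PySem.List.sorted_pairwise _ _
  obtain ⟨lenB, gB⟩ := B_outer k M.length M (le_refl _) hpwM (List.replicate n (0 : Int))
    (by
      intro q hq
      have hq' : (q.1, q.2) ∈ M := by simpa using hq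
      have := (hmemM q.1 q.2).mp hq'
      obtain ⟨kk, hkk, he⟩ := hrange (q.2, q.1) this
      exact ⟨kk, by simpa using hkk, he⟩)
  -- the two counts agree
  have hcount : ∀ m : Nat,
      ((PySem.Set.ofList (M.map Prod.fst)).countP (fun j =>
          decide (k ≤ PySem.Set.len (PySem.Set.ofList ((M.filter (fun q => q.1 == j)).map Prod.snd)))
            && (PySem.Set.ofList ((M.filter (fun q => q.1 == j)).map Prod.snd)).contains ((m : Nat) : Int)))
      = ((PySem.Set.ofList (L.map Prod.snd)).countP (fun j =>
          decide (k ≤ PySem.Set.len (SJ j)) && (SJ j).contains ((m : Nat) : Int))) := by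
    intro m
    have hpred : ∀ j ∈ PySem.Set.ofList (M.map Prod.fst),
        ((decide (k ≤ PySem.Set.len (PySem.Set.ofList ((M.filter (fun q => q.1 == j)).map Prod.snd)))
            && (PySem.Set.ofList ((M.filter (fun q => q.1 == j)).map Prod.snd)).contains ((m : Nat) : Int)) = true)
          ↔ ((decide (k ≤ PySem.Set.len (SJ j)) && (SJ j).contains ((m : Nat) : Int)) = true) := by
      intro j _
      rw [hsetLen j, hsetCont j]
    rw [List.countP_congr hpred]
    refine countP_nodup_mem _ _ _ (PySem.Set.nodup_ofList _) (PySem.Set.nodup_ofList _) ?_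
    intro j
    rw [PySem.Set.mem_ofList, PySem.Set.mem_ofList]
    constructor
    · intro h
      obtain ⟨q, hq, rfl⟩ := List.mem_map.mp h
      have hq' : (q.1, q.2) ∈ M := by simpa using hq
      exact List.mem_map.mpr ⟨(q.2, q.1), (hmemM q.1 q.2).mp hq', rfl⟩
    · intro h
      obtain ⟨p, hp, rfl⟩ := List.mem_map.mp h
      have hp' : (p.2, p.1) ∈ M := (hmemM p.2 p.1).mpr (by simpa using hp)
      exact List.mem_map.mpr ⟨(p.2, p.1), hp', rfl⟩
  -- assemble
  refine List.ext_getElem (by rw [lenA, lenB]) ?_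
  intro m hm1 hm2
  have hA := gA m
  have hB := gB m
  -- rewrite the A-side count through the dict structure to the set-of-reported count
  have hcntA : d.items.countP
      (fun q => decide (k ≤ PySem.Set.len q.2) && q.2.contains ((m : Nat) : Int))
      = (PySem.Set.ofList (L.map Prod.snd)).countP
          (fun j => decide (k ≤ PySem.Set.len (SJ j)) && (SJ j).contains ((m : Nat) : Int)) := by
    have step1 : d.items.countP
        (fun q => decide (k ≤ PySem.Set.len q.2) && q.2.contains ((m : Nat) : Int))
        = d.items.countP
            (fun q => decide (k ≤ PySem.Set.len (SJ q.1)) && (SJ q.1).contains ((m : Nat) : Int)) := by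
      refine List.countP_congr ?_
      intro q hq
      rw [hq2 q hq]
    rw [step1, ← hkeys]
    rw [PySem.Dict.keys, List.countP_map]
    rfl
  rw [hcntA] at hA
  rw [hcount m] at hB
  have hfinal : PySem.List.pyGetD (d.items.foldl
      (fun ans q =>
        if k ≤ PySem.Set.len q.2 then
          q.2.foldl (fun ans u => PySem.List.pySetD ans u (PySem.List.pyGetD ans u 0 + 1)) ans
        else ans)
      (List.replicate n (0 : Int))) ((m : Nat) : Int) 0
      = PySem.List.pyGetD (scanRuns k M (List.replicate n (0 : Int))) ((m : Nat) : Int) 0 := by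
    rw [hA, hB]
  rw [PySem.List.pyGetD_natCast, PySem.List.pyGetD_natCast] at hfinal
  rw [List.getD_eq_getElem?_getD, List.getD_eq_getElem?_getD] at hfinal
  rw [List.getElem?_eq_getElem hm1, List.getElem?_eq_getElem hm2] at hfinal
  simpa using hfinal

-- ===== VERDICT (by name: the statement is the Claim_ definition above) =====
theorem solution_practice_spec : Claim_equal_solution_practice := by
  intro id_list report k _ _
  unfold Spec_solution_practice
  simp only [solution_practice, solution_practice_alt]
  rw [foldA, foldB]
  rw [List.nil_append]
  refine core k id_list.length (report.filterMap (resv _)) ?_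
  intro p hp
  obtain ⟨r, _, hr⟩ := List.mem_filterMap.mp hp
  have hv := resv_fst_mem_values _ _ _ hr
  refine values_users_fold (Q := fun w => ∃ kk : Nat, kk < id_list.length ∧ w = (kk : Int))
    (PySem.List.enumerate id_list) _
    (by simp [PySem.Dict.empty, PySem.Dict.values]) ?_ p.1 hv
  intro q hq
  obtain ⟨kk, hkk, hq'⟩ := (PySem.List.mem_enumerate_iff _ _ _).mp hq
  exact ⟨kk, hkk, by simp [hq']⟩
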